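-- pv_equiv track=rewrite | github.com/ishaanshekhawat/PythonPractice | Idle GPU Days.py | gpu_idle_days
-- ===== SOURCE A (Python) =====
-- def gpu_idle_days(days, training_sessions):
--     s1 = set()
--     for i in training_sessions:
--         for j in range(i[0],i[1]+1):
--             s1.add(j)
--     ls = []
--     for i in range(1,days+1):
--         if i not in s1:
--             ls.append(i)
--     return len(ls)
-- ===== SOURCE B (Python) =====
-- def gpu_idle_days(days, training_sessions):
--     # Clip each session to [1, days], sort by start, merge overlaps,
--     # and subtract the total covered length from the number of days.
--     ivs = []
--     for s in training_sessions:
--         lo = s[0] if s[0] > 1 else 1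
--         hi = s[1] if s[1] < days else days
--         if lo <= hi:
--             ivs.append((lo, hi))
--     ivs.sort(key=lambda p: p[0])
--     covered = 0
--     cur_end = 0
--     for lo, hi in ivs:
--         if lo > cur_end:
--             covered += hi - lo + 1
--             cur_end = hi
--         elif hi > cur_end:
--             covered += hi - cur_end
--             cur_end = hi
--     total = days if days > 0 else 0
--     return total - covered
-- ===== Notes on version B (the rewrite author's own statement) =====
-- stated objective: alternative
-- what changed: Replaces per-day set materialisation (adding every covered day to a set, then scanning days 1..days) with clip-to-[1,days], sort-by-start and overlap-merge of the intervals, subtracting the total covered length from the day count; asymptotically lighter in principle (O(n log n) in the number of intervals vs O(sum of interval lengths + days)), but a timing run did not consistently confirm a speed-up, so none is claimed.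
import Mathlib
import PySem

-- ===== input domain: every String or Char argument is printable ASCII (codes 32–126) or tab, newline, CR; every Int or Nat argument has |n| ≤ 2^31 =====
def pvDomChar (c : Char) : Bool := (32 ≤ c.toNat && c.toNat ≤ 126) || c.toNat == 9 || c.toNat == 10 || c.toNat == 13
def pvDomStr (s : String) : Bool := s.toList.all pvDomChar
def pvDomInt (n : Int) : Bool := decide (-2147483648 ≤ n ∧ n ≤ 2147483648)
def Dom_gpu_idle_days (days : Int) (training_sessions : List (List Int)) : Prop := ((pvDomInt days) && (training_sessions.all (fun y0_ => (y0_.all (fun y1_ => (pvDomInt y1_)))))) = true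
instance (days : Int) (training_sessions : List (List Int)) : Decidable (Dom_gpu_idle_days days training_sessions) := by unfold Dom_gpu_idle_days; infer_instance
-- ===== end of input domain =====

-- B replaces A's per-day covered-set with clip/sort/merge of the intervals (a different algorithm; no speed claim); return values proved equal.

-- ===== PORT A =====
-- Python's set is a hash set; ported with Std.HashSet (exact for membership, which is all A uses).
def gpu_idle_days (days : Int) (training_sessions : List (List Int)) : Int :=
  let s1 : Std.HashSet Int := training_sessions.foldl (fun s1 i =>
    (PySem.List.pyRange (PySem.List.pyGetD i 0 0) (PySem.List.pyGetD i 1 0 + 1) 1).foldl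
      (fun s1 j => s1.insert j) s1) Std.HashSet.emptyWithCapacity
  let ls : List Int := (PySem.List.pyRange 1 (days + 1) 1).foldl
    (fun ls i => if s1.contains i then ls else ls ++ [i]) []
  (ls.length : Int)

-- ===== PORT B =====
def gpu_idle_days_alt (days : Int) (training_sessions : List (List Int)) : Int :=
  let ivs : List (Int × Int) := training_sessions.foldl (fun ivs s =>
    let lo := if PySem.List.pyGetD s 0 0 > 1 then PySem.List.pyGetD s 0 0 else 1
    let hi := if PySem.List.pyGetD s 1 0 < days then PySem.List.pyGetD s 1 0 else days
    if lo ≤ hi then ivs ++ [(lo, hi)] else ivs) []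
  let sortedIvs := PySem.List.sorted ivs (fun p => p.1) false
  let st : Int × Int := sortedIvs.foldl (fun st p =>
    if p.1 > st.2 then (st.1 + (p.2 - p.1 + 1), p.2)
    else if p.2 > st.2 then (st.1 + (p.2 - st.2), p.2)
    else st) (0, 0)
  let total := if days > 0 then days else 0
  total - st.1

-- ===== PRECONDITION & SPEC =====
-- Pre_ excludes only the sessions too short to index: A raises IndexError on i[0] or i[1] there.
def Pre_gpu_idle_days (days : Int) (training_sessions : List (List Int)) : Prop :=
  ∀ s ∈ training_sessions, 2 ≤ s.length
instance (days : Int) (training_sessions : List (List Int)) : Decidable (Pre_gpu_idle_days days training_sessions) := by unfold Pre_gpu_idle_days; infer_instance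
def pvWitness_gpu_idle_days : Int × List (List Int) := (5, [[2, 3], [4, 9]])

def Spec_gpu_idle_days (days : Int) (training_sessions : List (List Int)) (out : Int) : Prop := out = gpu_idle_days_alt days training_sessions
instance (days : Int) (training_sessions : List (List Int)) (out : Int) : Decidable (Spec_gpu_idle_days days training_sessions out) := by unfold Spec_gpu_idle_days; infer_instance

-- ===== CLAIM (what is proved, stated in full; the proofs are below) =====
def Claim_equal_gpu_idle_days : Prop := ∀ (days : Int) (training_sessions : List (List Int)), Dom_gpu_idle_days days training_sessions → Pre_gpu_idle_days days training_sessions → Spec_gpu_idle_days days training_sessions (gpu_idle_days days training_sessions)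

-- ===== LEMMAS AND PROOFS =====

-- the covered-day predicate (Bool), shared characterisation of both programs
def pvCov (training_sessions : List (List Int)) (d : Int) : Bool :=
  training_sessions.any (fun s => decide (PySem.List.pyGetD s 0 0 ≤ d ∧ d ≤ PySem.List.pyGetD s 1 0))

-- membership after folding HashSet.insert over any list
theorem pv_mem_foldl_add (l : List Int) (s : Std.HashSet Int) (j : Int) :
    j ∈ l.foldl (fun s x => s.insert x) s ↔ j ∈ s ∨ j ∈ l := by
  induction l generalizing s with
  | nil => simp
  | cons x t ih => simp [ih, Std.HashSet.mem_insert]; tauto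

-- membership in A's set s1
theorem pv_mem_s1 (ts : List (List Int)) (s : Std.HashSet Int) (j : Int) :
    j ∈ ts.foldl (fun s1 i =>
      (PySem.List.pyRange (PySem.List.pyGetD i 0 0) (PySem.List.pyGetD i 1 0 + 1) 1).foldl
        (fun s1 j => s1.insert j) s1) s ↔ j ∈ s ∨ pvCov ts j = true := by
  induction ts generalizing s with
  | nil => simp [pvCov]
  | cons i t ih =>
    rw [List.foldl_cons, ih, pv_mem_foldl_add]
    simp only [pvCov, List.any_cons, Bool.or_eq_true, PySem.List.mem_pyRange_one,
      decide_eq_true_eq, List.any_eq_true]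
    constructor
    · rintro (⟨h | ⟨h1, h2⟩⟩ | h)
      · exact Or.inl h
      · exact Or.inr (Or.inl ⟨h1, by omega⟩)
      · exact Or.inr (Or.inr h)
    · rintro (h | ⟨h1, h2⟩ | h)
      · exact Or.inl (Or.inl h)
      · exact Or.inl (Or.inr ⟨h1, by omega⟩)
      · exact Or.inr h

-- 'if c then acc else acc ++ [x]' collects exactly the elements failing c
theorem pv_foldl_skip (c : Int → Bool) (l : List Int) (acc : List Int) :
    l.foldl (fun ls i => if c i then ls else ls ++ [i]) acc = acc ++ l.filter (fun i => !c i) := by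
  induction l generalizing acc with
  | nil => simp
  | cons x t ih => by_cases h : c x <;> simp [h, ih]

-- A counts the days of 1..days not covered
theorem pv_A_eq (days : Int) (ts : List (List Int)) :
    gpu_idle_days days ts =
      (((PySem.List.pyRange 1 (days + 1) 1).filter (fun i => !pvCov ts i)).length : Int) := by
  simp only [gpu_idle_days]
  rw [pv_foldl_skip]
  norm_num
  apply congrArg
  apply List.filter_congr
  intro x _
  have hx := pv_mem_s1 ts Std.HashSet.emptyWithCapacity x
  simp only [Std.HashSet.not_mem_emptyWithCapacity, false_or] at hx
  cases hc : pvCov ts x <;> simp [Std.HashSet.contains_iff_mem, hx, hc]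

-- finite union of the intervals of a list (computable: via pyRange lists)
def pvUnionF (l : List (Int × Int)) : Finset ℤ :=
  (l.flatMap (fun p => PySem.List.pyRange p.1 (p.2 + 1) 1)).toFinset

theorem pv_mem_unionF (l : List (Int × Int)) (d : Int) :
    d ∈ pvUnionF l ↔ ∃ p ∈ l, p.1 ≤ d ∧ d ≤ p.2 := by
  simp only [pvUnionF, List.mem_toFinset, List.mem_flatMap, PySem.List.mem_pyRange_one]
  constructor
  · rintro ⟨p, hp, h1, h2⟩; exact ⟨p, hp, h1, by omega⟩
  · rintro ⟨p, hp, h1, h2⟩; exact ⟨p, hp, h1, by omega⟩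

theorem pv_card_Icc_filter (lo hi e : Int) :
    (((Finset.Icc lo hi).filter (fun d => e < d)).card : Int) =
      if lo > e then (if lo ≤ hi then hi - lo + 1 else 0)
      else if hi > e then hi - e else 0 := by
  have h1 : (Finset.Icc lo hi).filter (fun d => e < d) = Finset.Icc (max lo (e + 1)) hi := by
    ext d; simp only [Finset.mem_filter, Finset.mem_Icc]; omega
  rw [h1, Int.card_Icc]
  split_ifs <;> omega

-- splitting the filtered union at the head interval
theorem pv_split (lo hi e : Int) (t : List (Int × Int)) (hlh : lo ≤ hi)
    (hall : ∀ p ∈ t, lo ≤ p.1) :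
    ((pvUnionF ((lo, hi) :: t)).filter (fun d => e < d)).card =
      ((Finset.Icc lo hi).filter (fun d => e < d)).card +
      ((pvUnionF t).filter (fun d => max e hi < d)).card := by
  have hset : (pvUnionF ((lo, hi) :: t)).filter (fun d => e < d) =
      ((Finset.Icc lo hi).filter (fun d => e < d)) ∪
      ((pvUnionF t).filter (fun d => max e hi < d)) := by
    ext d
    simp only [Finset.mem_filter, Finset.mem_union, Finset.mem_Icc, pv_mem_unionF,
      List.mem_cons]
    constructor
    · rintro ⟨⟨p, hp | hp, h1, h2⟩, he⟩
      · rw [hp] at h1 h2; exact Or.inl ⟨⟨h1, h2⟩, he⟩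
      · by_cases hd : d ≤ max e hi
        · have := hall p hp
          exact Or.inl ⟨⟨by omega, by omega⟩, he⟩
        · exact Or.inr ⟨⟨p, hp, h1, h2⟩, by omega⟩
    · rintro (⟨⟨h1, h2⟩, he⟩ | ⟨⟨p, hp, h1, h2⟩, he⟩)
      · exact ⟨⟨(lo, hi), Or.inl rfl, h1, h2⟩, he⟩
      · exact ⟨⟨p, Or.inr hp, h1, h2⟩, by omega⟩
  rw [hset, Finset.card_union_of_disjoint]
  rw [Finset.disjoint_left]
  intro d hd1 hd2
  simp only [Finset.mem_filter, Finset.mem_Icc] at hd1 hd2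
  omega

-- the merge fold counts the part of the union above the current end
theorem pv_merge (l : List (Int × Int)) (c e : Int)
    (hle : ∀ p ∈ l, p.1 ≤ p.2) (hs : l.Pairwise (fun p q => p.1 ≤ q.1)) :
    (l.foldl (fun (st : Int × Int) p =>
      if p.1 > st.2 then (st.1 + (p.2 - p.1 + 1), p.2)
      else if p.2 > st.2 then (st.1 + (p.2 - st.2), p.2)
      else st) (c, e)).1 = c + (((pvUnionF l).filter (fun d => e < d)).card : Int) := by
  induction l generalizing c e with
  | nil => simp [pvUnionF]
  | cons p t ih =>
    obtain ⟨lo, hi⟩ := p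
    have hlh : lo ≤ hi := hle (lo, hi) (List.mem_cons_self)
    have hall : ∀ q ∈ t, lo ≤ q.1 := fun q hq => (List.pairwise_cons.1 hs).1 q hq
    have htail1 : ∀ q ∈ t, q.1 ≤ q.2 := fun q hq => hle q (List.mem_cons_of_mem _ hq)
    have htail2 : t.Pairwise (fun p q => p.1 ≤ q.1) := (List.pairwise_cons.1 hs).2
    have hcard : (((pvUnionF ((lo, hi) :: t)).filter (fun d => e < d)).card : Int) =
        (((Finset.Icc lo hi).filter (fun d => e < d)).card : Int) +
        (((pvUnionF t).filter (fun d => max e hi < d)).card : Int) := by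
      exact_mod_cast pv_split lo hi e t hlh hall
    have hIcc := pv_card_Icc_filter lo hi e
    simp only [List.foldl_cons]
    by_cases h1 : lo > e
    · have hm : max e hi = hi := by omega
      rw [hm] at hcard
      rw [if_pos (show lo > (c, e).2 from h1)]
      rw [ih _ _ htail1 htail2]
      rw [if_pos h1, if_pos hlh] at hIcc
      omega
    · rw [if_neg (show ¬ lo > (c, e).2 from h1)]
      by_cases h2 : hi > e
      · have hm : max e hi = hi := by omega
        rw [hm] at hcard
        rw [if_pos (show hi > (c, e).2 from h2)]
        rw [ih _ _ htail1 htail2]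
        rw [if_neg h1, if_pos h2] at hIcc
        omega
      · have hm : max e hi = e := by omega
        rw [hm] at hcard
        rw [if_neg (show ¬ hi > (c, e).2 from h2)]
        rw [ih _ _ htail1 htail2]
        rw [if_neg h1, if_neg h2] at hIcc
        omega

-- B's clipped interval list, explicitly
def pvClip (days : Int) (ts : List (List Int)) : List (Int × Int) :=
  (ts.filter (fun s =>
      decide ((if PySem.List.pyGetD s 0 0 > 1 then PySem.List.pyGetD s 0 0 else 1) ≤
              (if PySem.List.pyGetD s 1 0 < days then PySem.List.pyGetD s 1 0 else days)))).map
    (fun s => ((if PySem.List.pyGetD s 0 0 > 1 then PySem.List.pyGetD s 0 0 else 1),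
               (if PySem.List.pyGetD s 1 0 < days then PySem.List.pyGetD s 1 0 else days)))

theorem pv_clip_eq (days : Int) (ts : List (List Int)) :
    ts.foldl (fun ivs s =>
      let lo := if PySem.List.pyGetD s 0 0 > 1 then PySem.List.pyGetD s 0 0 else 1
      let hi := if PySem.List.pyGetD s 1 0 < days then PySem.List.pyGetD s 1 0 else days
      if lo ≤ hi then ivs ++ [(lo, hi)] else ivs) [] = pvClip days ts := by
  induction ts using List.reverseRecOn with
  | nil => simp [pvClip]
  | append_singleton t s ih =>
    rw [List.foldl_append, List.foldl_cons, List.foldl_nil, ih]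
    by_cases h : (if PySem.List.pyGetD s 0 0 > 1 then PySem.List.pyGetD s 0 0 else 1) ≤
        (if PySem.List.pyGetD s 1 0 < days then PySem.List.pyGetD s 1 0 else days)
    · simp only [pvClip, List.filter_append, List.map_append, List.filter_cons,
        List.filter_nil, List.map_nil, h, decide_true]
      simp
    · simp only [pvClip, List.filter_append, List.map_append, List.filter_cons,
        List.filter_nil, List.map_nil, if_neg h]
      simp [h]

theorem pv_mem_clip (days : Int) (ts : List (List Int)) (p : Int × Int) :
    p ∈ pvClip days ts ↔ ∃ s ∈ ts,
      (if PySem.List.pyGetD s 0 0 > 1 then PySem.List.pyGetD s 0 0 else 1) ≤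
        (if PySem.List.pyGetD s 1 0 < days then PySem.List.pyGetD s 1 0 else days) ∧
      p = ((if PySem.List.pyGetD s 0 0 > 1 then PySem.List.pyGetD s 0 0 else 1),
           (if PySem.List.pyGetD s 1 0 < days then PySem.List.pyGetD s 1 0 else days)) := by
  simp only [pvClip, List.mem_map, List.mem_filter, decide_eq_true_eq]
  constructor
  · rintro ⟨s, ⟨hs, hle⟩, hp⟩; exact ⟨s, hs, hle, hp.symm⟩
  · rintro ⟨s, hs, hle, hp⟩; exact ⟨s, ⟨hs, hle⟩, hp.symm⟩

-- the union of the clipped intervals is exactly the covered part of 1..days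
theorem pv_unionF_clip (days : Int) (ts : List (List Int)) (d : Int) :
    d ∈ pvUnionF (pvClip days ts) ↔ (1 ≤ d ∧ d ≤ days ∧ pvCov ts d = true) := by
  rw [pv_mem_unionF]
  constructor
  · rintro ⟨p, hp, h1, h2⟩
    rw [pv_mem_clip] at hp
    obtain ⟨s, hs, hle, hps⟩ := hp
    rw [hps] at h1 h2
    simp only at h1 h2
    refine ⟨by split_ifs at h1 <;> omega, by split_ifs at h2 <;> omega, ?_⟩
    simp only [pvCov, List.any_eq_true, decide_eq_true_eq]
    exact ⟨s, hs, by split_ifs at h1 h2 <;> omega⟩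
  · rintro ⟨h1, h2, hcov⟩
    simp only [pvCov, List.any_eq_true, decide_eq_true_eq] at hcov
    obtain ⟨s, hs, ha, hb⟩ := hcov
    refine ⟨((if PySem.List.pyGetD s 0 0 > 1 then PySem.List.pyGetD s 0 0 else 1),
             (if PySem.List.pyGetD s 1 0 < days then PySem.List.pyGetD s 1 0 else days)),
      ?_, ?_, ?_⟩
    · rw [pv_mem_clip]
      exact ⟨s, hs, by split_ifs <;> omega, rfl⟩
    · simp only; split_ifs <;> omega
    · simp only; split_ifs <;> omega

-- ===== VERDICT (by name: the statement is the Claim_ definition above) =====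
theorem gpu_idle_days_spec : Claim_equal_gpu_idle_days := by
  intro days ts _ _
  unfold Spec_gpu_idle_days
  rw [pv_A_eq]
  simp only [gpu_idle_days_alt]
  rw [pv_clip_eq]
  have hmem_s : ∀ p : Int × Int,
      p ∈ PySem.List.sorted (pvClip days ts) (fun p => p.1) false ↔ p ∈ pvClip days ts :=
    fun p => PySem.List.mem_sorted (pvClip days ts) (fun p => p.1) false p
  have hle : ∀ p ∈ PySem.List.sorted (pvClip days ts) (fun p => p.1) false, p.1 ≤ p.2 := by
    intro p hp
    rw [hmem_s, pv_mem_clip] at hp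
    obtain ⟨s, _, h, hps⟩ := hp
    rw [hps]
    exact h
  have hs : (PySem.List.sorted (pvClip days ts) (fun p => p.1) false).Pairwise
      (fun p q => p.1 ≤ q.1) := PySem.List.sorted_pairwise (pvClip days ts) (fun p => p.1)
  rw [pv_merge _ 0 0 hle hs]
  have hU : pvUnionF (PySem.List.sorted (pvClip days ts) (fun p => p.1) false) =
      pvUnionF (pvClip days ts) := by
    ext d; rw [pv_mem_unionF, pv_mem_unionF]
    constructor <;> rintro ⟨p, hp, h⟩
    · exact ⟨p, (hmem_s p).1 hp, h⟩
    · exact ⟨p, (hmem_s p).2 hp, h⟩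
  rw [hU]
  have hfilt : (pvUnionF (pvClip days ts)).filter (fun d => (0 : Int) < d) =
      pvUnionF (pvClip days ts) := by
    apply Finset.filter_true_of_mem
    intro d hd
    rw [pv_unionF_clip] at hd; omega
  rw [hfilt]
  have hUL : pvUnionF (pvClip days ts) =
      ((PySem.List.pyRange 1 (days + 1) 1).filter (fun d => pvCov ts d)).toFinset := by
    ext d
    rw [pv_unionF_clip]
    simp only [List.mem_toFinset, List.mem_filter, PySem.List.mem_pyRange_one]
    constructor
    · rintro ⟨h1, h2, h3⟩; exact ⟨⟨h1, by omega⟩, h3⟩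
    · rintro ⟨⟨h1, h2⟩, h3⟩; exact ⟨h1, by omega, h3⟩
  have hnodupL : (PySem.List.pyRange 1 (days + 1) 1).Nodup := PySem.List.nodup_pyRange_one 1 (days + 1)
  have hcard : ((pvUnionF (pvClip days ts)).card : Int) =
      (((PySem.List.pyRange 1 (days + 1) 1).filter (fun d => pvCov ts d)).length : Int) := by
    rw [hUL, List.toFinset_card_of_nodup (List.Nodup.filter _ hnodupL)]
  rw [hcard]
  have htot : (if days > 0 then days else 0) = ((PySem.List.pyRange 1 (days + 1) 1).length : Int) := by
    rw [PySem.List.length_pyRange_one]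
    split_ifs <;> omega
  rw [htot]
  have hsplitL : ((PySem.List.pyRange 1 (days + 1) 1).filter (fun d => pvCov ts d)).length +
      ((PySem.List.pyRange 1 (days + 1) 1).filter (fun d => !pvCov ts d)).length =
      (PySem.List.pyRange 1 (days + 1) 1).length := by
    have h := List.length_eq_length_filter_add (l := PySem.List.pyRange 1 (days + 1) 1)
      (fun d => pvCov ts d)
    simpa using h.symm
  omega
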